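-- pv_equiv track=rewrite | github.com/puzzlecollector/aiphabtc_v2 | aiphabtc/views/base_views.py | sort_tickers_based_on_market_cap
-- ===== SOURCE A (Python) =====
-- def sort_tickers_based_on_market_cap(usdt_tickers, market_cap_ordered_tickers):
--     # Create a dictionary for the market cap tickers with their ranking positions
--     market_cap_rankings = {ticker: i for i, ticker in enumerate(market_cap_ordered_tickers)}
--
--     # Split the tickers into those that are in the reference and those that aren't
--     known_tickers = []
--     unknown_tickers = []
--
--     for ticker in usdt_tickers:
--         if ticker in market_cap_rankings:
--             known_tickers.append(ticker)
--         else: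
--             unknown_tickers.append(ticker)
--
--     # Sort known tickers by their rank in the market cap list
--     sorted_known_tickers = sorted(known_tickers, key=lambda x: market_cap_rankings[x])
--
--     # Combine the sorted known tickers with the unknown tickers at the end
--     sorted_tickers = sorted_known_tickers + unknown_tickers
--
--     return sorted_tickers
-- ===== SOURCE B (Python) =====
-- def sort_tickers_based_on_market_cap(usdt_tickers, market_cap_ordered_tickers):
--     # Multiplicity map of the input tickers
--     counts = {}
--     for t in usdt_tickers:
--         counts[t] = counts.get(t, 0) + 1
--
--     # Rank = index of the LAST occurrence in the reference list
--     last = {}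
--     for i, t in enumerate(market_cap_ordered_tickers):
--         last[t] = i
--
--     # Known portion: walk the reference in rank order, emitting each ticker
--     # (at its ranking position) as many times as it occurs in the input.
--     result = []
--     for i, t in enumerate(market_cap_ordered_tickers):
--         if last[t] == i:
--             result.extend([t] * counts.get(t, 0))
--
--     # Unknown portion: original input order
--     for t in usdt_tickers:
--         if t not in last:
--             result.append(t)
--     return result
-- ===== Notes on version B (the rewrite author's own statement) =====
-- stated objective: alternative
-- what changed: B replaces A's partition-then-stable-sort by building a multiplicity map of the input and then traversing the reference list in its given rank order, emitting each known ticker (at its last, i.e. rank-defining, occurrence) repeated by its count, then appending the unknown tickers in input order; no sort is performed.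
import Mathlib
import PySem

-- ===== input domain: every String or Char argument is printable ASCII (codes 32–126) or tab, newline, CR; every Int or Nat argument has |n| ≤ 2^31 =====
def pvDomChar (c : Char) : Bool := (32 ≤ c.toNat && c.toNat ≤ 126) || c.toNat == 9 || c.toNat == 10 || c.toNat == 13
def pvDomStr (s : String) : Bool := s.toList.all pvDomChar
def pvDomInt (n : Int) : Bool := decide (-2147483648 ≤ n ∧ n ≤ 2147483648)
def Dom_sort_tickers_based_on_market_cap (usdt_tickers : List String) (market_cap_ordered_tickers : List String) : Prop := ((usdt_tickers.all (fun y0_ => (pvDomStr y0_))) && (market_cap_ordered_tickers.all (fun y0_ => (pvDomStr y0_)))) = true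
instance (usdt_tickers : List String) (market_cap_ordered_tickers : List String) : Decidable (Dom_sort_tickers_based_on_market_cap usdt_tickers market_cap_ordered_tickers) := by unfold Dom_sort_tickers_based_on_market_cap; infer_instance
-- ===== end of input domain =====

-- B replaces A's partition-then-stable-sort by a single rank-order traversal of the
-- reference list emitting each ticker by its multiplicity (alternative decomposition, same cost).

-- ===== PORT A =====
def sort_tickers_based_on_market_cap (usdt_tickers : List String) (market_cap_ordered_tickers : List String) : List String :=
  -- market_cap_rankings = {ticker: i for i, ticker in enumerate(market_cap_ordered_tickers)}
  let market_cap_rankings : PySem.Dict String Int :=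
    (PySem.List.enumerate market_cap_ordered_tickers 0).foldl
      (fun d p => d.insert p.2 p.1) PySem.Dict.empty
  -- partition loop
  let split := usdt_tickers.foldl
    (fun (acc : List String × List String) ticker =>
      if market_cap_rankings.contains ticker then (acc.1 ++ [ticker], acc.2)
      else (acc.1, acc.2 ++ [ticker]))
    ([], [])
  -- sorted(known, key=lambda x: market_cap_rankings[x]); x is always a key here, so getD is exact
  let sorted_known := PySem.List.sorted split.1 (fun x => market_cap_rankings.getD x 0) false
  sorted_known ++ split.2

-- ===== PORT B =====
def sort_tickers_based_on_market_cap_alt (usdt_tickers : List String) (market_cap_ordered_tickers : List String) : List String :=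
  -- counts[t] = counts.get(t, 0) + 1
  let counts : PySem.Dict String Int :=
    usdt_tickers.foldl (fun d t => d.insert t (d.getD t 0 + 1)) PySem.Dict.empty
  -- last[t] = i
  let last : PySem.Dict String Int :=
    (PySem.List.enumerate market_cap_ordered_tickers 0).foldl
      (fun d p => d.insert p.2 p.1) PySem.Dict.empty
  -- known portion: last[t] is always defined here, so getD is exact
  let known := (PySem.List.enumerate market_cap_ordered_tickers 0).foldl
    (fun acc p => if last.getD p.2 (-1) == p.1
      then acc ++ List.replicate (counts.getD p.2 0).toNat p.2 else acc) []
  -- unknown portion appended onto the same result list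
  usdt_tickers.foldl (fun acc t => if last.contains t then acc else acc ++ [t]) known

-- ===== PRECONDITION & SPEC =====
def Spec_sort_tickers_based_on_market_cap (usdt_tickers : List String) (market_cap_ordered_tickers : List String) (out : List String) : Prop := out = sort_tickers_based_on_market_cap_alt usdt_tickers market_cap_ordered_tickers
instance (usdt_tickers : List String) (market_cap_ordered_tickers : List String) (out : List String) : Decidable (Spec_sort_tickers_based_on_market_cap usdt_tickers market_cap_ordered_tickers out) := by unfold Spec_sort_tickers_based_on_market_cap; infer_instance

-- ===== CLAIM (what is proved, stated in full; the proofs are below) =====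
def Claim_equal_sort_tickers_based_on_market_cap : Prop := ∀ (usdt_tickers : List String) (market_cap_ordered_tickers : List String), Dom_sort_tickers_based_on_market_cap usdt_tickers market_cap_ordered_tickers → Spec_sort_tickers_based_on_market_cap usdt_tickers market_cap_ordered_tickers (sort_tickers_based_on_market_cap usdt_tickers market_cap_ordered_tickers)

-- ===== LEMMAS AND PROOFS =====

-- index of the LAST occurrence of t in mc (none if absent)
def pvLidx : List String → String → Option Nat
  | [], _ => none
  | x :: tl, t =>
    match pvLidx tl t with
    | some k => some (k + 1)
    | none => if t = x then some 0 else none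

lemma pvLidx_isSome_iff (mc : List String) (t : String) :
    (pvLidx mc t).isSome ↔ t ∈ mc := by
  induction mc with
  | nil => simp [pvLidx]
  | cons x tl ih =>
    rw [List.mem_cons, ← ih]
    cases h : pvLidx tl t with
    | some k => simp [pvLidx, h]
    | none =>
      by_cases hx : t = x
      · subst hx; simp [pvLidx, h]
      · simp [pvLidx, h, hx]

lemma pvLidx_getElem (mc : List String) (t : String) (k : Nat)
    (h : pvLidx mc t = some k) : ∃ h' : k < mc.length, mc[k] = t := by
  induction mc generalizing k with
  | nil => simp [pvLidx] at h
  | cons x tl ih =>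
    cases h' : pvLidx tl t with
    | some m =>
      rw [pvLidx, h'] at h
      obtain ⟨hm, he⟩ := ih m h'
      cases h; exact ⟨by simpa using Nat.succ_lt_succ hm, by simpa using he⟩
    | none =>
      rw [pvLidx, h'] at h
      by_cases hx : t = x
      · simp [hx] at h; cases h; exact ⟨by simp, by simp [hx]⟩
      · simp [hx] at h

-- the rank dict built by folding inserts of enumerate
lemma pvRank_get? (mc : List String) (s : Int) (d : PySem.Dict String Int) (t : String) :
    ((PySem.List.enumerate mc s).foldl (fun d p => d.insert p.2 p.1) d).get? t
      = match pvLidx mc t with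
        | some k => some (s + k)
        | none => d.get? t := by
  induction mc generalizing s d with
  | nil => simp [PySem.List.enumerate_nil, pvLidx]
  | cons x tl ih =>
    rw [PySem.List.enumerate_cons]
    simp only [List.foldl_cons]
    rw [ih]
    cases h : pvLidx tl t with
    | some k => simp [pvLidx, h]; ring
    | none =>
      by_cases hx : t = x
      · subst hx; simp [pvLidx, h, PySem.Dict.get?_insert_self]
      · simp [pvLidx, h, hx, PySem.Dict.get?_insert]

lemma pvRank_get?_zero (mc : List String) (t : String) :
    ((PySem.List.enumerate mc 0).foldl (fun d p => d.insert p.2 p.1) PySem.Dict.empty).get? t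
      = (pvLidx mc t).map (fun k => (k : Int)) := by
  rw [pvRank_get?]
  cases h : pvLidx mc t <;> simp [PySem.Dict.get?_empty]

lemma pvRank_contains (mc : List String) (t : String) :
    ((PySem.List.enumerate mc 0).foldl (fun d p => d.insert p.2 p.1) PySem.Dict.empty).contains t
      = decide (t ∈ mc) := by
  rw [PySem.Dict.contains_eq_isSome_get?, pvRank_get?_zero]
  cases h : pvLidx mc t with
  | some k =>
    have : t ∈ mc := (pvLidx_isSome_iff mc t).1 (by simp [h])
    simp [this]
  | none =>
    have : t ∉ mc := fun hm => by
      have := (pvLidx_isSome_iff mc t).2 hm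
      simp [h] at this
    simp [this]

lemma pvRank_getD (mc : List String) (t : String) (k : Nat) (h : pvLidx mc t = some k) (d0 : Int) :
    ((PySem.List.enumerate mc 0).foldl (fun d p => d.insert p.2 p.1) PySem.Dict.empty).getD t d0
      = (k : Int) := by
  rw [PySem.Dict.getD_eq_get?_getD, pvRank_get?_zero, h]; rfl

-- A's partition loop
lemma pvPairFold (p : String → Bool) (u : List String) (acc : List String × List String) :
    u.foldl (fun acc t => if p t then (acc.1 ++ [t], acc.2) else (acc.1, acc.2 ++ [t])) acc
      = (acc.1 ++ u.filter p, acc.2 ++ u.filter (fun t => !p t)) := by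
  induction u generalizing acc with
  | nil => simp
  | cons x tl ih => by_cases h : p x <;> simp [h, ih]

-- B's skip-or-append loop
lemma pvFoldSkip (c : String → Bool) (u : List String) (acc : List String) :
    u.foldl (fun acc t => if c t then acc else acc ++ [t]) acc
      = acc ++ u.filter (fun t => !c t) := by
  induction u generalizing acc with
  | nil => simp
  | cons x tl ih => by_cases h : c x <;> simp [h, ih]

-- B's conditional-extend loop
lemma pvFoldExtend (c : Int × String → Bool) (f : Int × String → List String)
    (l : List (Int × String)) (acc : List String) :
    l.foldl (fun acc p => if c p then acc ++ f p else acc) acc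
      = acc ++ l.flatMap (fun p => if c p then f p else []) := by
  induction l generalizing acc with
  | nil => simp
  | cons x tl ih => by_cases h : c x <;> simp [h, ih]

lemma pvSumIte (l : List (Int × String)) (b : Int × String) (c : Nat) :
    (l.map (fun x => if x = b then c else 0)).sum = c * l.count b := by
  induction l with
  | nil => simp
  | cons x tl ih =>
    by_cases h : x = b <;> simp [h, ih, Nat.mul_add, Nat.add_comm]

-- the heart: A's stable sort of the known tickers equals B's rank-order traversal
lemma pvKnown_eq (u mc : List String) :
    PySem.List.sorted
      (u.filter (fun t => ((PySem.List.enumerate mc 0).foldl (fun d p => d.insert p.2 p.1) PySem.Dict.empty).contains t))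
      (fun x => ((PySem.List.enumerate mc 0).foldl (fun d p => d.insert p.2 p.1) PySem.Dict.empty).getD x 0) false
    = (PySem.List.enumerate mc 0).flatMap
        (fun p => if ((PySem.List.enumerate mc 0).foldl (fun d p => d.insert p.2 p.1) PySem.Dict.empty).getD p.2 (-1) == p.1
          then List.replicate (u.count p.2) p.2 else []) := by
  have hlidx : ∀ t ∈ mc, ∃ k : Nat, pvLidx mc t = some k := by
    intro t ht
    have h1 := (pvLidx_isSome_iff mc t).2 ht
    cases h : pvLidx mc t with
    | none => rw [h] at h1; simp at h1
    | some k => exact ⟨k, rfl⟩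
  -- elements of B's block at p: they equal p.2, their key is p.1, and they are in mc
  have hblk : ∀ p ∈ PySem.List.enumerate mc 0,
      ∀ x ∈ (if ((PySem.List.enumerate mc 0).foldl (fun d p => d.insert p.2 p.1) PySem.Dict.empty).getD p.2 (-1) == p.1
          then List.replicate (u.count p.2) p.2 else []),
      x = p.2 ∧ x ∈ mc ∧
        ((PySem.List.enumerate mc 0).foldl (fun d p => d.insert p.2 p.1) PySem.Dict.empty).getD x 0 = p.1 := by
    intro p hp x hx
    split at hx
    case isFalse => simp at hx
    case isTrue hcond =>
      obtain ⟨hx2⟩ := (List.mem_replicate.1 hx).2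
      refine ⟨rfl, ?_, ?_⟩
      · obtain ⟨k, hk, hpe⟩ := (PySem.List.mem_enumerate_iff mc 0 p).1 hp
        rw [hpe]; exact List.getElem_mem hk
      · have hmem : p.2 ∈ mc := by
          obtain ⟨k, hk, hpe⟩ := (PySem.List.mem_enumerate_iff mc 0 p).1 hp
          rw [hpe]; exact List.getElem_mem hk
        obtain ⟨m, hm⟩ := hlidx p.2 hmem
        have h1 := pvRank_getD mc p.2 m hm (-1)
        have h2 := pvRank_getD mc p.2 m hm 0
        have h3 : ((m : Int)) = p.1 := by rw [← h1]; exact eq_of_beq hcond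
        rw [h2, h3]
  -- the key of a known ticker is injective across distinct tickers
  have hinj : ∀ a ∈ mc, ∀ b ∈ mc,
      ((PySem.List.enumerate mc 0).foldl (fun d p => d.insert p.2 p.1) PySem.Dict.empty).getD a 0
        = ((PySem.List.enumerate mc 0).foldl (fun d p => d.insert p.2 p.1) PySem.Dict.empty).getD b 0
      → a = b := by
    intro a ha b hb h
    obtain ⟨ka, hka⟩ := hlidx a ha
    obtain ⟨kb, hkb⟩ := hlidx b hb
    rw [pvRank_getD mc a ka hka 0, pvRank_getD mc b kb hkb 0] at h
    have hkk : ka = kb := by exact_mod_cast h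
    obtain ⟨ha', hea⟩ := pvLidx_getElem mc a ka hka
    obtain ⟨hb', heb⟩ := pvLidx_getElem mc b kb hkb
    subst hkk
    rw [← hea, ← heb]
  apply List.Perm.eq_of_pairwise
  · -- antisymmetry on the members
    intro a b hA hB h1 h2
    have haf := (PySem.List.mem_sorted _ _ _ _).1 hA
    have ham : a ∈ mc := by
      have := (List.mem_filter.1 haf).2
      rw [pvRank_contains] at this
      exact of_decide_eq_true this
    obtain ⟨p, hp, hx⟩ := List.mem_flatMap.1 hB
    obtain ⟨_, hbm, _⟩ := hblk p hp b hx
    exact hinj a ham b hbm (le_antisymm h1 h2)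
  · exact PySem.List.sorted_pairwise _ _
  · -- B's list is pairwise non-decreasing in key
    rw [List.pairwise_flatMap]
    constructor
    · intro p hp
      split
      · exact List.pairwise_replicate.2 (Or.inr (le_refl _))
      · exact List.Pairwise.nil
    · refine (PySem.List.pairwise_lt_enumerate mc 0).imp_of_mem ?_
      intro p q hp hq hlt x hx y hy
      obtain ⟨_, _, hkx⟩ := hblk p hp x hx
      obtain ⟨_, _, hky⟩ := hblk q hq y hy
      rw [hkx, hky]
      exact le_of_lt hlt
  · -- permutation: counts agree for every ticker
    refine ((PySem.List.sorted_perm _ _ _).trans ?_)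
    rw [List.perm_iff_count]
    intro a
    rw [List.count_flatMap]
    by_cases ha : a ∈ mc
    · obtain ⟨k0, hk0⟩ := hlidx a ha
      obtain ⟨hk0lt, hk0e⟩ := pvLidx_getElem mc a k0 hk0
      -- each block's count: nonzero only at the pair ((k0 : Int), a)
      have hcongr : ∀ p ∈ PySem.List.enumerate mc 0,
          (List.count a ∘ fun p => if ((PySem.List.enumerate mc 0).foldl (fun d p => d.insert p.2 p.1) PySem.Dict.empty).getD p.2 (-1) == p.1
            then List.replicate (u.count p.2) p.2 else []) p
          = (fun p => if p = (((k0 : Nat) : Int), a) then u.count a else 0) p := by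
        intro p hp
        simp only [Function.comp]
        by_cases hpe : p = (((k0 : Nat) : Int), a)
        · subst hpe
          rw [pvRank_getD mc a k0 hk0 (-1)]
          simp
        · rw [if_neg hpe]
          split
          next hcond =>
            rw [List.count_replicate]
            by_cases hpa : p.2 = a
            · exfalso
              apply hpe
              have hmem : p.2 ∈ mc := by
                obtain ⟨k, hk, hpe'⟩ := (PySem.List.mem_enumerate_iff mc 0 p).1 hp
                rw [hpe']; exact List.getElem_mem hk
              obtain ⟨m, hm⟩ := hlidx p.2 hmem
              have h1 := pvRank_getD mc p.2 m hm (-1)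
              have h3 : ((m : Int)) = p.1 := by rw [← h1]; exact eq_of_beq hcond
              rw [hpa] at hm
              rw [hm] at hk0
              have : m = k0 := by injection hk0
              subst this
              have : p = (p.1, p.2) := rfl
              rw [this, ← h3, hpa]
            · rw [if_neg]
              simp only [beq_iff_eq]
              exact hpa
          next => simp
      rw [List.map_congr_left hcongr, pvSumIte]
      have hmem1 : (((k0 : Nat) : Int), a) ∈ PySem.List.enumerate mc 0 := by
        rw [PySem.List.mem_enumerate_iff]
        exact ⟨k0, hk0lt, by rw [hk0e]; simp⟩
      have hnd : (PySem.List.enumerate mc 0).Nodup := by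
        refine (PySem.List.pairwise_lt_enumerate mc 0).imp ?_
        intro p q h heq
        rw [heq] at h
        exact lt_irrefl _ h
      rw [List.count_eq_one_of_mem hnd hmem1, Nat.mul_one]
      rw [List.count_filter]
      rw [pvRank_contains]
      simp [ha]
    · -- a is unknown: both sides are 0
      have hz : ∀ p ∈ PySem.List.enumerate mc 0,
          (List.count a ∘ fun p => if ((PySem.List.enumerate mc 0).foldl (fun d p => d.insert p.2 p.1) PySem.Dict.empty).getD p.2 (-1) == p.1
            then List.replicate (u.count p.2) p.2 else []) p
          = (fun (_ : Int × String) => 0) p := by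
        intro p hp
        simp only [Function.comp]
        split
        · rw [List.count_replicate]
          have hmem : p.2 ∈ mc := by
            obtain ⟨k, hk, hpe'⟩ := (PySem.List.mem_enumerate_iff mc 0 p).1 hp
            rw [hpe']; exact List.getElem_mem hk
          have hne : a ≠ p.2 := fun h => ha (h ▸ hmem)
          rw [if_neg]
          simp only [beq_iff_eq]
          exact Ne.symm hne
        · simp
      rw [List.map_congr_left hz]
      have h0 : List.count a (List.filter (fun t => ((PySem.List.enumerate mc 0).foldl (fun d p => d.insert p.2 p.1) PySem.Dict.empty).contains t) u) = 0 := by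
        rw [List.count_eq_zero]
        intro hmem
        have := (List.mem_filter.1 hmem).2
        rw [pvRank_contains] at this
        exact ha (of_decide_eq_true this)
      rw [h0]
      simp

theorem port_eq (u mc : List String) :
    sort_tickers_based_on_market_cap u mc = sort_tickers_based_on_market_cap_alt u mc := by
  simp only [sort_tickers_based_on_market_cap, sort_tickers_based_on_market_cap_alt]
  rw [pvPairFold, pvFoldExtend, pvFoldSkip]
  simp only [List.nil_append]
  congr 1
  have hc : ∀ (t : String),
      ((u.foldl (fun (d : PySem.Dict String Int) t => d.insert t (d.getD t 0 + 1)) PySem.Dict.empty).getD t 0).toNat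
        = u.count t := by
    intro t
    rw [PySem.Dict.getD_foldl_insert_add_one]
    simp [PySem.Dict.getD_empty]
  simp only [hc]
  exact pvKnown_eq u mc

-- ===== VERDICT (by name: the statement is the Claim_ definition above) =====
theorem sort_tickers_based_on_market_cap_spec : Claim_equal_sort_tickers_based_on_market_cap := by
  intro u mc _
  show _ = _
  exact port_eq u mc
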